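-- pv_equiv track=rewrite | github.com/MyHeartRaces/Tracegate | src/tracegate/cli/k3s_private_reload.py | _profile_stage_summary
-- ===== SOURCE A (Python) =====
-- from typing import Any
--
-- def _row_string(row: dict[str, Any], key: str) -> str:
--     return str(row.get(key) or "").strip()
--
-- def _sorted_unique(values: list[object]) -> list[str]:
--     return sorted({str(value).strip() for value in values if str(value).strip()}, key=str)
--
-- def _profile_stage_summary(rows: list[dict[str, Any]]) -> dict[str, object]:
--     by_variant: dict[str, list[str]] = {}
--     for row in rows:
--         variant = _row_string(row, "variant")
--         stage = _row_string(row, "stage")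
--         if not variant or not stage:
--             continue
--         by_variant.setdefault(variant, []).append(stage)
--     return {variant: _sorted_unique(stages) for variant, stages in sorted(by_variant.items(), key=lambda item: item[0])}
-- ===== SOURCE B (Python) =====
-- from typing import Any
--
-- def _row_string(row: dict[str, Any], key: str) -> str:
--     return str(row.get(key) or "").strip()
--
-- def _profile_stage_summary(rows: list[dict[str, Any]]) -> dict[str, object]:
--     pairs: set[tuple[str, str]] = set()
--     for row in rows:
--         variant = _row_string(row, "variant")
--         stage = _row_string(row, "stage")
--         if variant and stage:
--             pairs.add((variant, stage))
--     result: dict[str, object] = {}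
--     for variant, stage in sorted(pairs):
--         result.setdefault(variant, []).append(stage)
--     return result
-- ===== Notes on version B (the rewrite author's own statement) =====
-- stated objective: simpler
-- what changed: Instead of grouping stages into per-variant lists and then deduplicating, re-stripping and sorting each group (plus a final sort of the variants), B collects all valid (variant, stage) pairs in one global set and performs a single lexicographic sort of the pairs, from which both the variant order and each variant's stage order fall out while grouping with setdefault.
import Mathlib
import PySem

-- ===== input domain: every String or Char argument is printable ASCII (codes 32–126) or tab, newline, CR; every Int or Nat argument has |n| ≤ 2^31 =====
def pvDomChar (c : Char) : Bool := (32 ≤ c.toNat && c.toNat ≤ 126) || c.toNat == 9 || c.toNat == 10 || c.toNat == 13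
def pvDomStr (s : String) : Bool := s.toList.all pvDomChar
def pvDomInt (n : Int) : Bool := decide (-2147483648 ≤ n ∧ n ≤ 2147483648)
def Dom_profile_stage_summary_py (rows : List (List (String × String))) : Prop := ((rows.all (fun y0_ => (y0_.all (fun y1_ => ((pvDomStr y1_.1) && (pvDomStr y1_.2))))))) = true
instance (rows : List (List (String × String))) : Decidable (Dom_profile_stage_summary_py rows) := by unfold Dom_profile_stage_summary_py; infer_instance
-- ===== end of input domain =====

-- B replaces per-variant stage lists with per-group dedup/strip/sort by one global set of
-- (variant, stage) pairs and a single lexicographic sort; objective: simpler.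

-- ===== PORT A =====
-- _row_string(row, key) = str(row.get(key) or "").strip(); values are strings, `x or ""` is x
-- except that "" stays "" and str() is the identity, so stripping the .getD "" value is exact.
def rowString (row : List (String × String)) (key : String) : String :=
  PySem.Str.strip ((PySem.Dict.get? ⟨row⟩ key).getD "")

-- _sorted_unique(values) = sorted({str(v).strip() for v in values if str(v).strip()}, key=str)
def sortedUnique (values : List String) : List String :=
  PySem.List.sorted
    (PySem.Set.ofList (values.filterMap (fun v =>
      if PySem.Str.strip v = "" then none else some (PySem.Str.strip v))))
    (fun s => s) false

def profile_stage_summary_py (rows : List (List (String × String))) : List (String × List String) :=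
  let byVariant : PySem.Dict String (List String) :=
    rows.foldl (fun d row =>
      let variant := rowString row "variant"
      let stage := rowString row "stage"
      if variant = "" ∨ stage = "" then d
      -- by_variant.setdefault(variant, []).append(stage) mutates the stored list in place:
      -- exactly d[variant] = d.get(variant, []) + [stage]
      else d.modify variant [] (fun ss => ss ++ [stage])) PySem.Dict.empty
  (PySem.List.sorted byVariant.items (fun it => it.1) false).map
    (fun it => (it.1, sortedUnique it.2))

-- ===== PORT B =====
def profile_stage_summary_py_alt (rows : List (List (String × String))) : List (String × List String) :=
  let pairs : PySem.Set (String × String) :=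
    rows.foldl (fun s row =>
      let variant := rowString row "variant"
      let stage := rowString row "stage"
      if variant ≠ "" ∧ stage ≠ "" then PySem.Set.add s (variant, stage) else s)
      PySem.Set.empty
  let d : PySem.Dict String (List String) :=
    -- sorted(pairs) on tuples = sorted2 with fst/snd keys
    (PySem.List.sorted2 pairs Prod.fst Prod.snd false).foldl
      (fun d p => d.modify p.1 [] (fun ss => ss ++ [p.2])) PySem.Dict.empty
  d.items

-- ===== PRECONDITION & SPEC =====
def Spec_profile_stage_summary_py (rows : List (List (String × String))) (out : List (String × List String)) : Prop := out = profile_stage_summary_py_alt rows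
instance (rows : List (List (String × String))) (out : List (String × List String)) : Decidable (Spec_profile_stage_summary_py rows out) := by unfold Spec_profile_stage_summary_py; infer_instance

-- ===== CLAIM (what is proved, stated in full; the proofs are below) =====
def Claim_equal_profile_stage_summary_py : Prop := ∀ (rows : List (List (String × String))), Dom_profile_stage_summary_py rows → Spec_profile_stage_summary_py rows (profile_stage_summary_py rows)

-- ===== LEMMAS AND PROOFS =====

-- The valid (variant, stage) pairs of the input, in row order.
def pairsOf (rows : List (List (String × String))) : List (String × String) :=
  rows.filterMap (fun row =>
    let v := rowString row "variant"
    let s := rowString row "stage"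
    if v = "" ∨ s = "" then none else some (v, s))

-- strip is idempotent
theorem chars_lstrip_rstrip_lstrip (s : List Char) :
    PySem.Chars.lstrip (PySem.Chars.rstrip (PySem.Chars.lstrip s))
      = PySem.Chars.rstrip (PySem.Chars.lstrip s) := by
  simp only [PySem.Chars.lstrip, PySem.Chars.rstrip]
  generalize hs : List.dropWhile PySem.Chars.isspace s = t
  have hpre : ((List.dropWhile PySem.Chars.isspace t.reverse).reverse : List Char).IsPrefix t := by
    have hsuf : (List.dropWhile PySem.Chars.isspace t.reverse).IsSuffix t.reverse :=
      List.dropWhile_suffix _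
    have := (List.reverse_prefix (l₁ := List.dropWhile PySem.Chars.isspace t.reverse)
      (l₂ := t.reverse)).mpr hsuf
    simpa using this
  rcases h : (List.dropWhile PySem.Chars.isspace t.reverse).reverse with _ | ⟨a, u⟩
  · simp
  · have ha : t.head? = some a := by
      rcases hpre with ⟨r, hr⟩
      rw [h] at hr
      simp [← hr]
    have hsp : PySem.Chars.isspace a = false := by
      have hh := List.head?_dropWhile_not (p := PySem.Chars.isspace) (l := s)
      rw [hs, ha] at hh
      exact hh
    simp [hsp]

theorem chars_rstrip_idem (s : List Char) :
    PySem.Chars.rstrip (PySem.Chars.rstrip s) = PySem.Chars.rstrip s := by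
  simp [PySem.Chars.rstrip, List.dropWhile_idempotent]

theorem chars_strip_idem (s : List Char) :
    PySem.Chars.strip (PySem.Chars.strip s) = PySem.Chars.strip s := by
  unfold PySem.Chars.strip
  rw [chars_lstrip_rstrip_lstrip, chars_rstrip_idem]

theorem str_strip_idem (s : String) :
    PySem.Str.strip (PySem.Str.strip s) = PySem.Str.strip s := by
  have h2 : (PySem.Str.strip (PySem.Str.strip s)).toList = (PySem.Str.strip s).toList := by
    simp [PySem.Str.toList_strip, chars_strip_idem]
  exact String.toList_inj.mp h2

-- PySem dedup (Set.ofList) is a sublist of its input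
theorem ofList_sublist {α : Type} [BEq α] [LawfulBEq α] (xs : List α) :
    (PySem.Set.ofList xs).Sublist xs := by
  induction xs with
  | nil => simp [PySem.Set.ofList_nil]
  | cons x xs ih =>
    rw [PySem.Set.ofList_cons]
    refine List.Sublist.cons₂ x (List.Sublist.trans ?_ ih)
    have := List.filter_sublist (l := PySem.Set.ofList xs) (p := fun y => !y == x)
    simpa [PySem.Set.discard] using this

-- sorted2 with fst/snd keys is sorted with the lexicographic key
theorem sorted2_eq_sorted_lex (xs : List (String × String)) :
    PySem.List.sorted2 xs Prod.fst Prod.snd false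
      = PySem.List.sorted xs (fun p => toLex p) false := by
  unfold PySem.List.sorted2 PySem.List.sorted
  simp only [if_neg (by decide : ¬ (false = true))]
  congr 1
  funext acc x
  congr 1
  funext a b
  rcases a with ⟨a1, a2⟩; rcases b with ⟨b1, b2⟩
  by_cases h1 : a1 < b1 <;> by_cases h2 : b1 < a1 <;> by_cases h3 : a2 < b2 <;>
    simp [h1, h2, h3, Prod.Lex.lt_iff]
  all_goals first
    | exact absurd (lt_trans h1 h2) (lt_irrefl _)
    | exact fun h => absurd (h ▸ h2) (lt_irrefl _)
    | exact le_antisymm (not_lt.1 h2) (not_lt.1 h1)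

-- A's row loop = a loop over the valid pairs
theorem foldA_eq (rows : List (List (String × String))) (d : PySem.Dict String (List String)) :
    rows.foldl (fun d row =>
      let variant := rowString row "variant"
      let stage := rowString row "stage"
      if variant = "" ∨ stage = "" then d
      else d.modify variant [] (fun ss => ss ++ [stage])) d
    = (pairsOf rows).foldl (fun d p => d.modify p.1 [] (fun ss => ss ++ [p.2])) d := by
  induction rows generalizing d with
  | nil => simp [pairsOf]
  | cons row rows ih =>
    simp only [List.foldl_cons, pairsOf, List.filterMap_cons]
    by_cases h : rowString row "variant" = "" ∨ rowString row "stage" = ""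
    · simp only [if_pos h]
      exact ih d
    · simp only [if_neg h, List.foldl_cons]
      exact ih _

-- B's row loop = the set of the valid pairs
theorem foldB_eq (rows : List (List (String × String))) (s : PySem.Set (String × String)) :
    rows.foldl (fun s row =>
      let variant := rowString row "variant"
      let stage := rowString row "stage"
      if variant ≠ "" ∧ stage ≠ "" then PySem.Set.add s (variant, stage) else s) s
    = (pairsOf rows).foldl PySem.Set.add s := by
  induction rows generalizing s with
  | nil => simp [pairsOf]
  | cons row rows ih =>
    simp only [List.foldl_cons, pairsOf, List.filterMap_cons]
    by_cases h : rowString row "variant" = "" ∨ rowString row "stage" = ""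
    · have h' : ¬ (rowString row "variant" ≠ "" ∧ rowString row "stage" ≠ "") := by tauto
      simp only [if_pos h, if_neg h']
      exact ih s
    · have h' : rowString row "variant" ≠ "" ∧ rowString row "stage" ≠ "" := by tauto
      simp only [if_neg h, if_pos h', List.foldl_cons]
      exact ih _

-- every valid pair consists of stripped nonempty strings
theorem pairsOf_stripped (rows : List (List (String × String))) (p : String × String)
    (hp : p ∈ pairsOf rows) :
    PySem.Str.strip p.1 = p.1 ∧ p.1 ≠ "" ∧ PySem.Str.strip p.2 = p.2 ∧ p.2 ≠ "" := by
  rcases List.mem_filterMap.mp hp with ⟨row, _, hrow⟩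
  by_cases h : rowString row "variant" = "" ∨ rowString row "stage" = ""
  · simp only [if_pos h] at hrow; cases hrow
  · simp only [if_neg h] at hrow
    push Not at h
    cases hrow
    exact ⟨str_strip_idem _, h.1, str_strip_idem _, h.2⟩

-- the items of the dict grouped from a pair list, as a map over the deduped keys
theorem dict_items_eq (l : List (String × String)) :
    ((l.foldl (fun d p => d.modify p.1 [] (fun ss => ss ++ [p.2]))
        (PySem.Dict.empty : PySem.Dict String (List String))).items)
      = (PySem.Set.ofList (l.map Prod.fst)).map
          (fun v => (v, (l.filter (fun p => p.1 == v)).map (fun p => p.2))) := by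
  have hkeys := PySem.Dict.keys_foldl_modify_key l Prod.fst ([] : List String)
      (fun _ p => fun ss => ss ++ [p.2]) PySem.Dict.empty
  have hek : (PySem.Dict.empty : PySem.Dict String (List String)).keys = [] := by
    simp [PySem.Dict.empty, PySem.Dict.keys]
  have hnd := PySem.Dict.nodup_keys_foldl_modify_key l Prod.fst ([] : List String)
      (fun _ p => fun ss => ss ++ [p.2]) PySem.Dict.empty (by simp [hek])
  have hitems := PySem.Dict.items_eq_map_keys _ hnd ([] : List String)
  rw [hitems, hkeys, hek, PySem.Set.update_nil_left]
  apply List.map_congr_left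
  intro v _
  have hg := PySem.Dict.getD_foldl_modify_append l
      (PySem.Dict.empty : PySem.Dict String (List String)) v
  simp only [hg]
  have : (PySem.Dict.empty : PySem.Dict String (List String)).getD v [] = [] := by
    simp [PySem.Dict.empty, PySem.Dict.getD, PySem.Dict.get?]
  rw [this, List.nil_append]

theorem A_eq (rows : List (List (String × String))) :
    profile_stage_summary_py rows
      = (PySem.List.sorted (PySem.Set.ofList ((pairsOf rows).map Prod.fst)) (fun v => v) false).map
          (fun v => (v, sortedUnique (((pairsOf rows).filter (fun p => p.1 == v)).map (fun p => p.2)))) := by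
  unfold profile_stage_summary_py
  rw [foldA_eq]
  dsimp only
  rw [dict_items_eq]
  set P := pairsOf rows
  set V := PySem.Set.ofList (P.map Prod.fst) with hV
  set f : String → String × List String :=
    fun v => (v, (P.filter (fun p => p.1 == v)).map (fun p => p.2)) with hf
  have hs : PySem.List.sorted (V.map f) (fun it => it.1) false
      = (PySem.List.sorted V (fun v => v) false).map f := by
    apply PySem.List.sorted_eq_of_perm_of_pairwise_lt
    · exact (PySem.List.sorted_perm V (fun v => v) false).map f
    · have h1 := PySem.List.sorted_ofList_pairwise_lt (P.map Prod.fst)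
      rw [← hV] at h1
      exact List.pairwise_map.mpr h1
  rw [hs, List.map_map]
  rfl

theorem B_eq (rows : List (List (String × String))) :
    profile_stage_summary_py_alt rows
      = (PySem.Set.ofList
          ((PySem.List.sorted (PySem.Set.ofList (pairsOf rows)) (fun p => toLex p) false).map Prod.fst)).map
        (fun v => (v, ((PySem.List.sorted (PySem.Set.ofList (pairsOf rows)) (fun p => toLex p) false).filter
            (fun p => p.1 == v)).map (fun p => p.2))) := by
  unfold profile_stage_summary_py_alt
  rw [foldB_eq]
  dsimp only
  rw [show (pairsOf rows).foldl PySem.Set.add PySem.Set.empty = PySem.Set.ofList (pairsOf rows) from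
    (PySem.Set.ofList_eq_foldl _).symm]
  rw [sorted2_eq_sorted_lex, dict_items_eq]

theorem lex_le_fst {a b : String × String} (h : (toLex a : Lex (String × String)) ≤ toLex b) :
    a.1 ≤ b.1 := by
  rcases Prod.Lex.le_iff.mp h with h1 | ⟨h1, _⟩
  · exact le_of_lt h1
  · exact le_of_eq h1

-- the deduped firsts of the lex-sorted deduped pairs = the sorted deduped firsts
theorem keys_sorted_eq (P : List (String × String)) :
    PySem.Set.ofList ((PySem.List.sorted (PySem.Set.ofList P) (fun p => toLex p) false).map Prod.fst)
      = PySem.List.sorted (PySem.Set.ofList (P.map Prod.fst)) (fun v => v) false := by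
  set Q := PySem.List.sorted (PySem.Set.ofList P) (fun p => toLex p) false with hQ
  have hQperm : Q.Perm (PySem.Set.ofList P) := PySem.List.sorted_perm _ _ _
  have hQle : Q.Pairwise (fun a b => (toLex a : Lex (String × String)) ≤ toLex b) :=
    PySem.List.sorted_pairwise _ _
  apply Eq.symm
  apply PySem.List.sorted_eq_of_perm_of_pairwise_lt
  · rw [List.perm_ext_iff_of_nodup (PySem.Set.nodup_ofList _) (PySem.Set.nodup_ofList _)]
    intro a
    simp only [PySem.Set.mem_ofList, List.mem_map]
    constructor
    · rintro ⟨p, hp, rfl⟩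
      exact ⟨p, (PySem.Set.mem_ofList _ _).mp (hQperm.mem_iff.mp hp), rfl⟩
    · rintro ⟨p, hp, rfl⟩
      exact ⟨p, hQperm.mem_iff.mpr ((PySem.Set.mem_ofList _ _).mpr hp), rfl⟩
  · have hle_map : ((Q.map Prod.fst)).Pairwise (fun a b => a ≤ b) :=
      List.pairwise_map.mpr (hQle.imp lex_le_fst)
    have hle' := List.Pairwise.sublist (ofList_sublist (Q.map Prod.fst)) hle_map
    have hne : (PySem.Set.ofList (Q.map Prod.fst)).Pairwise (fun a b => a ≠ b) :=
      PySem.Set.nodup_ofList _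
    exact (hle'.and hne).imp (fun h => lt_of_le_of_ne h.1 h.2)

-- the v-stages of the lex-sorted deduped pairs = the sorted deduped v-stages
theorem stages_sorted_eq (P : List (String × String)) (v : String) :
    ((PySem.List.sorted (PySem.Set.ofList P) (fun p => toLex p) false).filter
        (fun p => p.1 == v)).map (fun p => p.2)
      = PySem.List.sorted
          (PySem.Set.ofList ((P.filter (fun p => p.1 == v)).map (fun p => p.2)))
          (fun s => s) false := by
  set Q := PySem.List.sorted (PySem.Set.ofList P) (fun p => toLex p) false with hQ
  have hQperm : Q.Perm (PySem.Set.ofList P) := PySem.List.sorted_perm _ _ _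
  have hQnodup : Q.Nodup := hQperm.nodup_iff.mpr (PySem.Set.nodup_ofList P)
  have hQle : Q.Pairwise (fun a b => (toLex a : Lex (String × String)) ≤ toLex b) :=
    PySem.List.sorted_pairwise _ _
  apply Eq.symm
  apply PySem.List.sorted_eq_of_perm_of_pairwise_lt
  · rw [List.perm_ext_iff_of_nodup]
    · intro x
      simp only [List.mem_map, List.mem_filter, PySem.Set.mem_ofList, beq_iff_eq]
      constructor
      · rintro ⟨p, ⟨hp, hv⟩, rfl⟩
        exact ⟨p, ⟨(PySem.Set.mem_ofList _ _).mp (hQperm.mem_iff.mp hp), hv⟩, rfl⟩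
      · rintro ⟨p, ⟨hp, hv⟩, rfl⟩
        exact ⟨p, ⟨hQperm.mem_iff.mpr ((PySem.Set.mem_ofList _ _).mpr hp), hv⟩, rfl⟩
    · refine List.Nodup.map_on ?_ (hQnodup.filter _)
      intro x hx y hy hxy
      have hx1 : x.1 = v := by simpa using (List.mem_filter.mp hx).2
      have hy1 : y.1 = v := by simpa using (List.mem_filter.mp hy).2
      exact Prod.ext (hx1.trans hy1.symm) hxy
    · exact PySem.Set.nodup_ofList _
  · have h2 : (Q.filter (fun p => p.1 == v)).Pairwise
        (fun a b => ((toLex a : Lex (String × String)) ≤ toLex b) ∧ a ≠ b) :=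
      List.Pairwise.filter _ (hQle.and hQnodup)
    refine List.pairwise_map.mpr (h2.imp_of_mem ?_)
    intro a b ha hb hab
    have ha1 : a.1 = v := by simpa using (List.mem_filter.mp ha).2
    have hb1 : b.1 = v := by simpa using (List.mem_filter.mp hb).2
    rcases Prod.Lex.le_iff.mp hab.1 with h1 | ⟨_, h2'⟩ <;> [skip; simp only [ofLex_toLex] at h2']
    · simp only [ofLex_toLex] at h1
      rw [ha1, hb1] at h1; exact absurd h1 (lt_irrefl v)
    · refine lt_of_le_of_ne h2' (fun he => hab.2 (Prod.ext (ha1.trans hb1.symm) he))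

-- re-stripping already-stripped nonempty strings is the identity
theorem filterMap_strip_id (values : List String)
    (h : ∀ x ∈ values, PySem.Str.strip x = x ∧ x ≠ "") :
    values.filterMap (fun v =>
      if PySem.Str.strip v = "" then none else some (PySem.Str.strip v)) = values := by
  induction values with
  | nil => rfl
  | cons x xs ih =>
    have hx := h x (List.mem_cons_self ..)
    rw [List.filterMap_cons]
    rw [if_neg (by rw [hx.1]; exact hx.2), hx.1,
      ih (fun y hy => h y (List.mem_cons_of_mem _ hy))]

-- ===== VERDICT (by name: the statement is the Claim_ definition above) =====
theorem profile_stage_summary_py_spec : Claim_equal_profile_stage_summary_py := by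
  intro rows _
  unfold Spec_profile_stage_summary_py
  rw [A_eq, B_eq, keys_sorted_eq]
  apply List.map_congr_left
  intro v _
  rw [stages_sorted_eq]
  have h : ∀ x ∈ ((pairsOf rows).filter (fun p => p.1 == v)).map (fun p => p.2),
      PySem.Str.strip x = x ∧ x ≠ "" := by
    intro x hx
    rcases List.mem_map.mp hx with ⟨p, hp, rfl⟩
    have := pairsOf_stripped rows p (List.mem_of_mem_filter hp)
    exact ⟨this.2.2.1, this.2.2.2⟩
  unfold sortedUnique
  rw [filterMap_strip_id _ h]
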